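-- pv_equiv track=rewrite | github.com/GeethaPalanisamy-721/Project11_ecommerce_agentic_recommender | src/models/hybrid_model.py | safe_merge_recs
-- ===== SOURCE A (Python) =====
-- def safe_merge_recs(list1, list2, k=10):
--     """
--     Safely merges two recommendation lists by interleaving them.
--     Preserves ranking order and prevents duplicates.
--     """
--     merged = []
--     seen = set()
--
--     # Alternate picking from list1 and list2
--     for i in range(max(len(list1), len(list2))):
--         if i < len(list1) and list1[i] not in seen:
--             merged.append(list1[i])
--             seen.add(list1[i])
--         if len(merged) == k: break
--
--         if i < len(list2) and list2[i] not in seen: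
--             merged.append(list2[i])
--             seen.add(list2[i])
--         if len(merged) == k: break
--
--     return merged
-- ===== SOURCE B (Python) =====
-- def safe_merge_recs(list1, list2, k=10):
--     """Two-phase rewrite: build the full interleaved candidate list, then
--     dedupe preserving order with dict.fromkeys and cap at k."""
--     candidates = []
--     for i in range(max(len(list1), len(list2))):
--         candidates += list1[i:i+1] + list2[i:i+1]
--     uniq = list(dict.fromkeys(candidates))
--     return uniq[:k] if k > 0 else []
-- ===== Notes on version B (the rewrite author's own statement) =====
-- stated objective: idiomatic
-- what changed: Replaced the interwoven append/seen-set/early-break loop by two phases: build the full interleaved candidate list, then dedupe preserving order with dict.fromkeys and cap with a slice.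
-- intended difference: For k <= 0 (with a nonempty relevant list) A's 'len(merged) == k' break never fires (k<0) or fires only if the first candidate comes from list2 (k=0), so A returns the whole deduped interleave; B returns the intended empty top-k list []. — e.g. on safe_merge_recs([1], [], 0): A returns [1], B returns []
import Mathlib
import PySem

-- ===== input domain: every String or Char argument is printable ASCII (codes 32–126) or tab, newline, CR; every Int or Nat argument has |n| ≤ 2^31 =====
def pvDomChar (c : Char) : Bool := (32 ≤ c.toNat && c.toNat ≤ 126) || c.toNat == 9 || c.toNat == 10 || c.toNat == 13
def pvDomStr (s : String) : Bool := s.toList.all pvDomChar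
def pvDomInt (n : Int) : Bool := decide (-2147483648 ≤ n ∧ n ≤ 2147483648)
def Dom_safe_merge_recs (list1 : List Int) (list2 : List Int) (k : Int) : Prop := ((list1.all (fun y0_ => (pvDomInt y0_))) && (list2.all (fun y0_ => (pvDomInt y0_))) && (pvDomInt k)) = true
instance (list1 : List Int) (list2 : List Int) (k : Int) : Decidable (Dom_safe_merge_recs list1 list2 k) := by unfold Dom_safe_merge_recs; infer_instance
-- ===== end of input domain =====

-- B rebuilds A's result in two phases (full interleaved candidate list, then ordered dedup + cap);
-- return-value equivalence is proved outside D_ (the k ≤ 0 corner, where A's '== k' break misbehaves).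

-- ===== PORT A =====
-- the body of Python's 'if i < len(list) and list[i] not in seen: merged.append(...); seen.add(...)'
-- (it appears twice in the loop, once per list)
def aStep (l : List Int) (i : Nat) (m : List Int) (s : PySem.Set Int) : List Int × PySem.Set Int :=
  if i < l.length ∧ PySem.Set.contains s (l.getD i 0) = false
  then (m ++ [l.getD i 0], PySem.Set.add s (l.getD i 0)) else (m, s)

-- the for-loop: per index, conditional append from list1, break check, conditional append from
-- list2, break check; fuel = remaining indices of range(max(len1, len2))
def aLoop (l1 l2 : List Int) (k : Int) : Nat → Nat → List Int → PySem.Set Int → List Int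
  | 0, _, m, _ => m
  | fuel+1, i, m, s =>
    let p1 := aStep l1 i m s
    if (p1.1.length : Int) = k then p1.1 else
      let p2 := aStep l2 i p1.1 p1.2
      if (p2.1.length : Int) = k then p2.1 else aLoop l1 l2 k fuel (i+1) p2.1 p2.2

def safe_merge_recs (list1 : List Int) (list2 : List Int) (k : Int) : List Int :=
  aLoop list1 list2 k (max list1.length list2.length) 0 [] PySem.Set.empty

-- ===== PORT B =====
def safe_merge_recs_alt (list1 : List Int) (list2 : List Int) (k : Int) : List Int :=
  let candidates := (List.range (max list1.length list2.length)).foldl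
    (fun acc (i : Nat) => acc ++ PySem.List.slice list1 (some (i : Int)) (some ((i : Int) + 1))
                              ++ PySem.List.slice list2 (some (i : Int)) (some ((i : Int) + 1))) []
  let uniq := PySem.List.dedup candidates
  if 0 < k then PySem.List.slice uniq none (some k) else []

-- ===== PRECONDITION & SPEC =====
-- For k ≤ 0 (with a nonempty relevant list) A's 'len(merged) == k' break never fires (k < 0) or fires
-- only when the first candidate comes from list2 (k = 0), so A returns the whole deduped interleave;
-- B returns the intended empty top-k list [].
def D_safe_merge_recs (list1 : List Int) (list2 : List Int) (k : Int) : Prop :=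
  (k < 0 ∧ (list1 ≠ [] ∨ list2 ≠ [])) ∨ (k = 0 ∧ list1 ≠ [])
instance (list1 : List Int) (list2 : List Int) (k : Int) : Decidable (D_safe_merge_recs list1 list2 k) := by unfold D_safe_merge_recs; infer_instance

def Spec_safe_merge_recs (list1 : List Int) (list2 : List Int) (k : Int) (out : List Int) : Prop :=
  ¬ D_safe_merge_recs list1 list2 k → out = safe_merge_recs_alt list1 list2 k
instance (list1 : List Int) (list2 : List Int) (k : Int) (out : List Int) : Decidable (Spec_safe_merge_recs list1 list2 k out) := by unfold Spec_safe_merge_recs; infer_instance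

def pvDiffWitness_safe_merge_recs : List Int × List Int × Int := ([1], [], 0)
def pvDiffWitnessOut_safe_merge_recs : (List Int) × (List Int) := ([1], [])

-- ===== CLAIM (what is proved, stated in full; the proofs are below) =====
def Claim_unchanged_safe_merge_recs : Prop := ∀ (list1 : List Int) (list2 : List Int) (k : Int), Dom_safe_merge_recs list1 list2 k → Spec_safe_merge_recs list1 list2 k (safe_merge_recs list1 list2 k)
def Claim_changed_safe_merge_recs : Prop := Dom_safe_merge_recs (pvDiffWitness_safe_merge_recs.1) (pvDiffWitness_safe_merge_recs.2.1) (pvDiffWitness_safe_merge_recs.2.2) ∧ D_safe_merge_recs (pvDiffWitness_safe_merge_recs.1) (pvDiffWitness_safe_merge_recs.2.1) (pvDiffWitness_safe_merge_recs.2.2) ∧ safe_merge_recs (pvDiffWitness_safe_merge_recs.1) (pvDiffWitness_safe_merge_recs.2.1) (pvDiffWitness_safe_merge_recs.2.2) = pvDiffWitnessOut_safe_merge_recs.1 ∧ safe_merge_recs_alt (pvDiffWitness_safe_merge_recs.1) (pvDiffWitness_safe_merge_recs.2.1) (pvDiffWitness_safe_merge_recs.2.2) = pvDiffWitnessOut_safe_merge_recs.2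 ∧ pvDiffWitnessOut_safe_merge_recs.1 ≠ pvDiffWitnessOut_safe_merge_recs.2
def Claim_exact_safe_merge_recs : Prop := ∀ (list1 : List Int) (list2 : List Int) (k : Int), Dom_safe_merge_recs list1 list2 k → D_safe_merge_recs list1 list2 k → safe_merge_recs list1 list2 k ≠ safe_merge_recs_alt list1 list2 k

-- ===== LEMMAS AND PROOFS =====

-- reference interleaving of the two lists
def inter : List Int → List Int → List Int
  | [], ys => ys
  | xs, [] => xs
  | x::xs, y::ys => x :: y :: inter xs ys

@[simp] lemma inter_nil_left (ys : List Int) : inter [] ys = ys := by cases ys <;> rfl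
@[simp] lemma inter_nil_right (xs : List Int) : inter xs [] = xs := by cases xs <;> rfl

lemma inter_step (xs ys : List Int) :
    inter xs ys = xs.take 1 ++ ys.take 1 ++ inter xs.tail ys.tail := by
  cases xs <;> cases ys <;> simp [inter]

-- A's loop with the break check factored per candidate
def cLoop (k : Int) : List Int → List Int → PySem.Set Int → List Int
  | [], m, _ => m
  | c::cs, m, s =>
    if PySem.Set.contains s c then
      if (m.length : Int) = k then m else cLoop k cs m s
    else
      if ((m.length : Int) + 1) = k then m ++ [c] else cLoop k cs (m ++ [c]) (PySem.Set.add s c)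

-- ordered dedup of cs relative to already-seen set s
def filterNew (s : PySem.Set Int) : List Int → List Int
  | [] => []
  | c::cs => if PySem.Set.contains s c then filterNew s cs
             else c :: filterNew (PySem.Set.add s c) cs

lemma aStep_prefix (l : List Int) (i : Nat) (m : List Int) (s : PySem.Set Int) :
    m <+: (aStep l i m s).1 := by
  unfold aStep; split_ifs <;> simp

lemma aLoop_prefix (l1 l2 : List Int) (k : Int) (fuel i : Nat) (m : List Int) (s : PySem.Set Int) :
    m <+: aLoop l1 l2 k fuel i m s := by
  induction fuel generalizing i m s with
  | zero => simp [aLoop]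
  | succ fuel ih =>
    simp only [aLoop]
    have h1 := aStep_prefix l1 i m s
    have h2 := h1.trans (aStep_prefix l2 i (aStep l1 i m s).1 (aStep l1 i m s).2)
    split_ifs <;> first | exact h1 | exact h2 | exact h2.trans (ih _ _ _)

lemma aLoop_ne_nil (l1 l2 : List Int) (k : Int) (fuel i : Nat) (m : List Int) (s : PySem.Set Int)
    (hm : m ≠ []) : aLoop l1 l2 k fuel i m s ≠ [] := by
  obtain ⟨t, ht⟩ := aLoop_prefix l1 l2 k fuel i m s
  intro h; rw [← ht] at h; simp_all

-- one candidate step of A equals one (optional) element step of cLoop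
lemma cand_step (k : Int) (l : List Int) (i : Nat) (m : List Int) (s : PySem.Set Int)
    (F : List Int → PySem.Set Int → List Int) (rest : List Int)
    (hm : (m.length : Int) < k)
    (hF : ∀ m' s', (m'.length : Int) < k → F m' s' = cLoop k rest m' s') :
    (if (((aStep l i m s).1.length : Int)) = k then (aStep l i m s).1
     else F (aStep l i m s).1 (aStep l i m s).2)
    = cLoop k ((l.drop i).take 1 ++ rest) m s := by
  by_cases hi : i < l.length
  · have hd : l.drop i = l.getD i 0 :: l.drop (i+1) := by
      rw [List.getD_eq_getElem l 0 hi]; exact List.drop_eq_getElem_cons hi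
    rw [hd]
    have ht : (l.getD i 0 :: l.drop (i+1)).take 1 = [l.getD i 0] := rfl
    rw [ht]
    simp only [List.cons_append, List.nil_append]
    cases hc : PySem.Set.contains s (l.getD i 0) with
    | true =>
      have hP : ¬(i < l.length ∧ PySem.Set.contains s (l.getD i 0) = false) := by
        rintro ⟨-, h⟩; rw [h] at hc; cases hc
      have ha : aStep l i m s = (m, s) := by unfold aStep; rw [if_neg hP]
      rw [ha]
      simp only [cLoop]
      rw [if_pos hc, if_neg (show ¬((m.length : Int) = k) by omega),
          if_neg (show ¬((m.length : Int) = k) by omega), hF m s hm]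
    | false =>
      have hP : (i < l.length ∧ PySem.Set.contains s (l.getD i 0) = false) := ⟨hi, hc⟩
      have ha : aStep l i m s = (m ++ [l.getD i 0], PySem.Set.add s (l.getD i 0)) := by
        unfold aStep; rw [if_pos hP]
      rw [ha]
      simp only [cLoop]
      rw [if_neg (show ¬(PySem.Set.contains s (l.getD i 0) = true) from
            fun h => by rw [h] at hc; cases hc)]
      have hlen : (((m ++ [l.getD i 0]).length : Int)) = (m.length : Int) + 1 := by simp
      by_cases hk1 : ((m.length : Int) + 1) = k
      · rw [if_pos (by rw [hlen]; exact hk1), if_pos hk1]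
      · rw [if_neg (by rw [hlen]; exact hk1), if_neg hk1,
            hF _ _ (by rw [hlen]; omega)]
  · have hd : l.drop i = [] := List.drop_eq_nil_of_le (by omega)
    rw [hd]
    simp only [List.take_nil, List.nil_append]
    have hP : ¬(i < l.length ∧ PySem.Set.contains s (l.getD i 0) = false) := fun h => hi h.1
    have ha : aStep l i m s = (m, s) := by unfold aStep; rw [if_neg hP]
    rw [ha]
    rw [if_neg (show ¬((m.length : Int) = k) by omega), hF m s hm]

lemma aLoop_eq_cLoop (l1 l2 : List Int) (k : Int) (fuel i : Nat) (m : List Int) (s : PySem.Set Int)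
    (h1 : l1.length ≤ i + fuel) (h2 : l2.length ≤ i + fuel) (hm : (m.length : Int) < k) :
    aLoop l1 l2 k fuel i m s = cLoop k (inter (l1.drop i) (l2.drop i)) m s := by
  induction fuel generalizing i m s with
  | zero =>
    have e1 : l1.drop i = [] := List.drop_eq_nil_of_le (by omega)
    have e2 : l2.drop i = [] := List.drop_eq_nil_of_le (by omega)
    simp [aLoop, e1, e2, cLoop]
  | succ fuel ih =>
    rw [inter_step, List.tail_drop, List.tail_drop]
    simp only [aLoop, List.append_assoc]
    refine cand_step k l1 i m s
      (fun m1 s1 =>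
        if (((aStep l2 i m1 s1).1.length : Int)) = k then (aStep l2 i m1 s1).1
        else aLoop l1 l2 k fuel (i+1) (aStep l2 i m1 s1).1 (aStep l2 i m1 s1).2)
      ((l2.drop i).take 1 ++ inter (l1.drop (i+1)) (l2.drop (i+1))) hm ?_
    intro m' s' hm'
    refine cand_step k l2 i m' s' (fun m2 s2 => aLoop l1 l2 k fuel (i+1) m2 s2)
      (inter (l1.drop (i+1)) (l2.drop (i+1))) hm' ?_
    intro m'' s'' hm''
    exact ih (i+1) m'' s'' (by omega) (by omega) hm''

lemma cLoop_eq_filterNew (k : Int) (cs : List Int) (m : List Int) (s : PySem.Set Int)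
    (hm : (m.length : Int) < k) :
    cLoop k cs m s = m ++ (filterNew s cs).take (k.toNat - m.length) := by
  induction cs generalizing m s with
  | nil => simp [cLoop, filterNew]
  | cons c cs ih =>
    by_cases hc : PySem.Set.contains s c
    · simp only [cLoop, filterNew, hc, if_pos]
      rw [if_neg (by omega)]
      exact ih m s hm
    · simp only [cLoop, filterNew, hc, if_false, Bool.false_eq_true]
      by_cases he : ((m.length : Int) + 1) = k
      · rw [if_pos he]
        have h1 : k.toNat - m.length = 1 := by omega
        simp [h1]
      · rw [if_neg he]
        rw [ih (m ++ [c]) (PySem.Set.add s c) (by simp; omega)]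
        have h1 : k.toNat - m.length = (k.toNat - (m ++ [c]).length) + 1 := by simp; omega
        simp [h1]

lemma filterNew_update (cs : List Int) (s : PySem.Set Int) :
    s ++ filterNew s cs = PySem.Set.update s cs := by
  induction cs generalizing s with
  | nil => simp [filterNew, PySem.Set.update]
  | cons c cs ih =>
    simp only [PySem.Set.update, List.foldl_cons]
    by_cases hc : PySem.Set.contains s c
    · have ha : PySem.Set.add s c = s := by unfold PySem.Set.add; rw [if_pos hc]
      have hf0 : filterNew s (c::cs)
          = if PySem.Set.contains s c then filterNew s cs else c :: filterNew (PySem.Set.add s c) cs := rfl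
      have hf : filterNew s (c::cs) = filterNew s cs := by rw [hf0, if_pos hc]
      rw [ha, hf]
      have h := ih s
      simp only [PySem.Set.update] at h
      exact h
    · have ha : PySem.Set.add s c = s ++ [c] := by unfold PySem.Set.add; rw [if_neg hc]
      have hf0 : filterNew s (c::cs)
          = if PySem.Set.contains s c then filterNew s cs else c :: filterNew (PySem.Set.add s c) cs := rfl
      have hf : filterNew s (c::cs) = c :: filterNew (PySem.Set.add s c) cs := by rw [hf0, if_neg hc]
      rw [hf, ha]
      have h := ih (s ++ [c])
      simp only [PySem.Set.update] at h
      rw [← h]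
      simp

lemma filterNew_empty (cs : List Int) :
    filterNew ([] : PySem.Set Int) cs = PySem.Set.ofList cs := by
  have h := filterNew_update cs ([] : PySem.Set Int)
  rw [PySem.Set.update_nil_left] at h
  simpa using h

-- B's candidate fold builds exactly the interleaving
lemma cand_fold (l1 l2 : List Int) (n j : Nat) (acc : List Int)
    (h1 : l1.length ≤ j + n) (h2 : l2.length ≤ j + n) :
    (List.range' j n).foldl
      (fun acc (i : Nat) => acc ++ PySem.List.slice l1 (some (i : Int)) (some ((i : Int) + 1))
                        ++ PySem.List.slice l2 (some (i : Int)) (some ((i : Int) + 1))) acc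
      = acc ++ inter (l1.drop j) (l2.drop j) := by
  induction n generalizing j acc with
  | zero =>
    have e1 : l1.drop j = [] := List.drop_eq_nil_of_le (by omega)
    have e2 : l2.drop j = [] := List.drop_eq_nil_of_le (by omega)
    simp [e1, e2]
  | succ n ih =>
    rw [List.range'_succ, List.foldl_cons]
    rw [ih (j+1) _ (by omega) (by omega)]
    have hs1 : PySem.List.slice l1 (some (j : Int)) (some ((j : Int) + 1)) = (l1.drop j).take 1 := by
      have h := PySem.List.slice_natCast_add l1 j 1
      simpa using h
    have hs2 : PySem.List.slice l2 (some (j : Int)) (some ((j : Int) + 1)) = (l2.drop j).take 1 := by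
      have h := PySem.List.slice_natCast_add l2 j 1
      simpa using h
    rw [hs1, hs2, inter_step (l1.drop j) (l2.drop j), List.tail_drop, List.tail_drop]
    simp

lemma alt_pos (l1 l2 : List Int) (k : Int) (hk : 0 < k) :
    safe_merge_recs_alt l1 l2 k = (PySem.List.dedup (inter l1 l2)).take k.toNat := by
  unfold safe_merge_recs_alt
  rw [List.range_eq_range']
  rw [cand_fold l1 l2 _ 0 [] (by omega) (by omega)]
  simp [hk, PySem.List.slice_to _ (le_of_lt hk)]

lemma a_pos (l1 l2 : List Int) (k : Int) (hk : 0 < k) :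
    safe_merge_recs l1 l2 k = (PySem.List.dedup (inter l1 l2)).take k.toNat := by
  unfold safe_merge_recs
  rw [aLoop_eq_cLoop l1 l2 k _ 0 [] PySem.Set.empty (by omega) (by omega)
        (by simpa using hk)]
  rw [cLoop_eq_filterNew k _ [] PySem.Set.empty (by simpa using hk)]
  simp [filterNew_empty, PySem.List.dedup_eq_ofList, PySem.Set.empty]

-- ===== VERDICT (by name: the statement is the Claim_ definition above) =====
theorem safe_merge_recs_spec : Claim_unchanged_safe_merge_recs := by
  intro l1 l2 k _ hD
  unfold D_safe_merge_recs at hD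
  push Not at hD
  rcases lt_trichotomy k 0 with hk | hk | hk
  · obtain ⟨h1, h2⟩ := hD.1 hk
    subst h1; subst h2
    unfold safe_merge_recs safe_merge_recs_alt
    simp only [aLoop, List.length_nil, Nat.max_self, List.range_zero, List.foldl_nil]
    rw [if_neg (by omega : ¬ (0:Int) < k)]
  · have h1 : l1 = [] := hD.2 hk
    subst h1; subst hk
    show safe_merge_recs [] l2 0 = safe_merge_recs_alt [] l2 0
    unfold safe_merge_recs safe_merge_recs_alt
    cases l2 with
    | nil => rfl
    | cons y ys => simp [aLoop, aStep]
  · rw [a_pos l1 l2 k hk, alt_pos l1 l2 k hk]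

theorem safe_merge_recs_changed : Claim_changed_safe_merge_recs := by
  unfold Claim_changed_safe_merge_recs; decide

theorem safe_merge_recs_tight : Claim_exact_safe_merge_recs := by
  intro l1 l2 k _ hD
  have hB : safe_merge_recs_alt l1 l2 k = [] := by
    unfold safe_merge_recs_alt
    have h0 : ¬ 0 < k := by
      unfold D_safe_merge_recs at hD; rcases hD with ⟨h, _⟩ | ⟨h, _⟩ <;> omega
    simp [h0]
  rw [hB]
  have hk0 : k ≤ 0 ∧ ((k < 0 ∧ (l1 ≠ [] ∨ l2 ≠ [])) ∨ (k = 0 ∧ l1 ≠ [])) := by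
    unfold D_safe_merge_recs at hD; rcases hD with ⟨h, h2⟩ | ⟨h, h2⟩ <;> exact ⟨by omega, by tauto⟩
  unfold safe_merge_recs
  cases l1 with
  | cons a t =>
    -- l1 nonempty: a is appended at i = 0 before any break check can fire
    have hf : max (a::t).length l2.length = (max (a::t).length l2.length - 1) + 1 := by
      simp
    rw [hf]
    simp only [aLoop]
    have ha : aStep (a::t) 0 [] PySem.Set.empty = ([a], [a]) := by
      unfold aStep; rw [if_pos ⟨by simp, rfl⟩]; rfl
    rw [ha]
    have hne1 : ((([a] : List Int).length : Int)) ≠ k := by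
      have hkle := hk0.1; simp; omega
    rw [if_neg hne1]
    have h2 := aStep_prefix l2 0 [a] [a]
    split_ifs with hc
    · intro hcon
      obtain ⟨u, hu⟩ := h2
      simp_all
    · refine aLoop_ne_nil _ _ _ _ _ _ _ ?_
      obtain ⟨u, hu⟩ := h2
      intro hcon
      rw [← hu] at hcon
      simp_all
  | nil =>
    have hk : k < 0 := by
      rcases hk0.2 with ⟨h, -⟩ | ⟨-, h⟩
      · exact h
      · exact absurd rfl h
    have hl2 : l2 ≠ [] := by
      rcases hk0.2 with ⟨-, h | h⟩ | ⟨-, h⟩ <;> simp_all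
    cases l2 with
    | nil => exact absurd rfl hl2
    | cons b u =>
      have hf : max ([] : List Int).length (b::u).length = u.length + 1 := by simp
      rw [hf]
      simp only [aLoop]
      have ha1 : aStep ([] : List Int) 0 [] PySem.Set.empty = ([], []) := by
        unfold aStep; rw [if_neg (by rintro ⟨h, -⟩; simp at h)]; rfl
      rw [ha1]
      rw [if_neg (show ¬((([] : List Int).length : Int)) = k by simp; omega)]
      have ha2 : aStep (b::u) 0 [] ([] : PySem.Set Int) = ([b], [b]) := by
        unfold aStep; rw [if_pos ⟨by simp, rfl⟩]; rfl
      rw [ha2]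
      rw [if_neg (show ¬((([b] : List Int).length : Int)) = k by simp; omega)]
      exact aLoop_ne_nil _ _ _ _ _ _ _ (by simp)
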